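-- pv_equiv track=rewrite | github.com/teghub/news_prediction | scripts/ruleMining.py | _calcSupport
-- ===== SOURCE A (Python) =====
-- def _calcSupport(itemset, support_where):
--         """
--         Given a set of items and the support_where
--         calculates the support of the set
--         support_where : {subgraph_id(int) : supporting_graph_ids(set of ints)}
--         The return value is the collective support
--         meaning the supporting graphs contain all subgraphs in the itemset
--         """
--         if len(itemset) < 1:
--                 return 0
--         _gidfirst = itemset[0]
--         acc = set(support_where[_gidfirst])
--         for item_gid in itemset[1:]:
--                 acc = acc.intersection(support_where[item_gid])
--         return len(acc)
-- ===== SOURCE B (Python) =====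
-- def _calcSupport(itemset, support_where):
--     if len(itemset) < 1:
--         return 0
--     counts = {}
--     for item in itemset:
--         for gid in support_where[item]:
--             counts[gid] = counts.get(gid, 0) + 1
--     n = len(itemset)
--     return sum(1 for c in counts.values() if c == n)
-- ===== Notes on version B (the rewrite author's own statement) =====
-- stated objective: alternative
-- what changed: Replaces the shrinking set-intersection accumulator with a single frequency table: one pass increments a per-graph-id counter over every item's support set, and the result is the number of ids whose count equals len(itemset).
import Mathlib
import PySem

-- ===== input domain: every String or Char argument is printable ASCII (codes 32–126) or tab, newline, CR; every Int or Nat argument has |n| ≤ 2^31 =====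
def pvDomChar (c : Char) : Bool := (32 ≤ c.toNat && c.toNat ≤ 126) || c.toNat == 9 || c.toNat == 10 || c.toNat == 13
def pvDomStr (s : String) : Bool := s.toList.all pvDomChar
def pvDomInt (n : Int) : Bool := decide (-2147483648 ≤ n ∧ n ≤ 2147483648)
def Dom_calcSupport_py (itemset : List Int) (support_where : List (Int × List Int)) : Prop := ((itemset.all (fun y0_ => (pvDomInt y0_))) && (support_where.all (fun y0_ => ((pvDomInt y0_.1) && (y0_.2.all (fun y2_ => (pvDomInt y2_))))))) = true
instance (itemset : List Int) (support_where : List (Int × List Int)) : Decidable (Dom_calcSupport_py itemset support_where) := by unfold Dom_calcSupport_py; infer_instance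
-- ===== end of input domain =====

-- B replaces A's shrinking set-intersection accumulator with a one-pass frequency table
-- (count per graph id, then count the ids reaching full multiplicity); same asymptotic cost.

-- ===== PORT A =====
-- dict[int, set[int]] decoding shared by both ports: support_where[k] as a Python set
-- (first-match association-list lookup; PySem.Set.ofList dedups the value list into the set it denotes)
def pvLookup (support_where : List (Int × List Int)) (k : Int) : PySem.Set Int :=
  PySem.Set.ofList (((support_where.find? (fun p => p.1 == k)).map (·.2)).getD [])

def calcSupport_py (itemset : List Int) (support_where : List (Int × List Int)) : Int :=
  match itemset with
  | [] => 0                -- if len(itemset) < 1: return 0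
  | first :: rest =>       -- _gidfirst = itemset[0]; acc = set(support_where[_gidfirst])
    PySem.Set.len
      (rest.foldl (fun acc gid => PySem.Set.inter acc (pvLookup support_where gid))
        (pvLookup support_where first))

-- ===== PORT B =====
def calcSupport_py_alt (itemset : List Int) (support_where : List (Int × List Int)) : Int :=
  match itemset with
  | [] => 0
  | _ :: _ =>
    let counts : PySem.Dict Int Int :=
      itemset.foldl
        (fun d item =>
          (pvLookup support_where item).foldl (fun d gid => d.modify gid 0 (· + 1)) d)
        PySem.Dict.empty
    ((counts.values.filter (fun c => c == (itemset.length : Int))).length : Int)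

-- ===== PRECONDITION & SPEC =====
-- Pre_ excludes exactly the inputs on which A raises KeyError: some item of itemset is not a key of support_where.
def Pre_calcSupport_py (itemset : List Int) (support_where : List (Int × List Int)) : Prop :=
  (itemset.all (fun it => support_where.any (fun p => p.1 == it))) = true
instance (itemset : List Int) (support_where : List (Int × List Int)) : Decidable (Pre_calcSupport_py itemset support_where) := by unfold Pre_calcSupport_py; infer_instance

def pvWitness_calcSupport_py : List Int × (List (Int × List Int)) :=
  ([1, 2], [(1, [10, 20]), (2, [20, 30])])

def Spec_calcSupport_py (itemset : List Int) (support_where : List (Int × List Int)) (out : Int) : Prop := out = calcSupport_py_alt itemset support_where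
instance (itemset : List Int) (support_where : List (Int × List Int)) (out : Int) : Decidable (Spec_calcSupport_py itemset support_where out) := by unfold Spec_calcSupport_py; infer_instance

-- ===== CLAIM =====
def Claim_equal_calcSupport_py : Prop := ∀ (itemset : List Int) (support_where : List (Int × List Int)), Dom_calcSupport_py itemset support_where → Pre_calcSupport_py itemset support_where → Spec_calcSupport_py itemset support_where (calcSupport_py itemset support_where)

-- ===== LEMMAS AND PROOFS =====

-- A's intersection loop is a filter by membership in every set of the loop list.
theorem foldl_inter_eq_filter (sw : List (Int × List Int)) (l : List Int) (acc : List Int) :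
    l.foldl (fun acc gid => PySem.Set.inter acc (pvLookup sw gid)) acc
      = acc.filter (fun g => l.all (fun it => (pvLookup sw it).contains g)) := by
  induction l generalizing acc with
  | nil => simp
  | cons a l ih =>
    rw [List.foldl_cons, ih]
    simp only [PySem.Set.inter, List.filter_filter, List.all_cons]
    apply List.filter_congr
    intro g _
    exact Bool.and_comm _ _

-- B's nested counting loop is Counter over the concatenation of all decoded support sets.
theorem nested_foldl_eq_counter (sw : List (Int × List Int)) (xs : List Int) (d : PySem.Dict Int Int) :
    xs.foldl (fun d item => (pvLookup sw item).foldl (fun d gid => d.modify gid 0 (· + 1)) d) d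
      = (xs.flatMap (fun it => (pvLookup sw it : List Int))).foldl
          (fun d gid => d.modify gid 0 (· + 1)) d := by
  induction xs generalizing d with
  | nil => rfl
  | cons a xs ih => simp [List.flatMap_cons, List.foldl_append, ih]

theorem sum_map_ite_eq_countP (p : Int → Bool) (xs : List Int) :
    (xs.map (fun it => if p it then 1 else 0)).sum = xs.countP p := by
  induction xs with
  | nil => rfl
  | cons a xs ih =>
    by_cases h : p a = true <;> simp [h, ih, Nat.add_comm]

-- count of g in the concatenation = number of items whose support set contains g
theorem count_flat (sw : List (Int × List Int)) (xs : List Int) (g : Int) :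
    (xs.flatMap (fun it => (pvLookup sw it : List Int))).count g
      = xs.countP (fun it => (pvLookup sw it).contains g) := by
  rw [List.count_flatMap]
  rw [← sum_map_ite_eq_countP]
  congr 1
  apply List.map_congr_left
  intro it _
  simp only [Function.comp_apply]
  by_cases hm : g ∈ (pvLookup sw it : List Int)
  · have h : (pvLookup sw it).contains g = true := by simpa [List.contains_iff_mem] using hm
    rw [if_pos h]
    exact List.count_eq_one_of_mem (PySem.Set.nodup_ofList _) hm
  · have h : ¬ (pvLookup sw it).contains g = true := by simpa [List.contains_iff_mem] using hm
    rw [if_neg h]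
    exact List.count_eq_zero.mpr hm

-- ===== VERDICT =====
theorem calcSupport_py_spec : Claim_equal_calcSupport_py := by
  intro itemset sw _ _
  unfold Spec_calcSupport_py
  cases itemset with
  | nil => rfl
  | cons first rest =>
    set S0 := (pvLookup sw first : List Int) with hS0
    set p : Int → Bool :=
      fun g => (first :: rest).all (fun it => (pvLookup sw it).contains g) with hp
    set L := (first :: rest).flatMap (fun it => (pvLookup sw it : List Int)) with hL
    have hcount : ∀ g, (L.count g = (first :: rest).length) ↔ p g = true := by
      intro g
      rw [hL, count_flat, hp, List.countP_eq_length, List.all_eq_true]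
    have hA : calcSupport_py (first :: rest) sw = ((S0.filter p).length : Int) := by
      simp only [calcSupport_py, PySem.Set.len, foldl_inter_eq_filter]
      congr 2
      apply List.filter_congr
      intro g hg
      simp only [hp, List.all_cons]
      simp [hg]
    have hB : calcSupport_py_alt (first :: rest) sw
        = (((PySem.Set.ofList L).filter p).length : Int) := by
      simp only [calcSupport_py_alt]
      rw [nested_foldl_eq_counter, ← hL, ← PySem.Dict.counter_eq_foldl]
      simp only [PySem.Dict.values, PySem.Dict.items_counter, List.map_map]
      rw [← List.countP_eq_length_filter, ← List.countP_eq_length_filter, List.countP_map]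
      congr 1
      apply List.countP_congr
      intro k _
      have h := hcount k
      cases hq : p k with
      | true =>
        rw [hq] at h
        simp [Function.comp, h.mpr rfl]
      | false =>
        rw [hq] at h
        have hne : ¬ L.count k = (first :: rest).length := fun hh => by
          simpa using h.mp hh
        simp only [Function.comp_apply, beq_iff_eq]
        simpa using fun hh => hne (by exact_mod_cast hh)
    rw [hA, hB]
    have perm : ((PySem.Set.ofList L).filter p).Perm (S0.filter p) := by
      refine (List.perm_ext_iff_of_nodup
        (List.Nodup.filter _ (PySem.Set.nodup_ofList _))
        (List.Nodup.filter _ (PySem.Set.nodup_ofList _))).mpr ?_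
      intro g
      simp only [List.mem_filter, PySem.Set.mem_ofList]
      constructor
      · rintro ⟨_, hpg⟩
        refine ⟨?_, hpg⟩
        have hc := (List.all_eq_true.mp (by rw [hp] at hpg; exact hpg)) first (by simp)
        simpa [pvLookup, PySem.Set.mem_ofList, List.contains_iff_mem] using hc
      · rintro ⟨hgS, hpg⟩
        refine ⟨?_, hpg⟩
        rw [hL, List.mem_flatMap]
        refine ⟨first, by simp, ?_⟩
        simpa [pvLookup, PySem.Set.mem_ofList] using hgS
    exact_mod_cast perm.length_eq.symm
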